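-- pv_equiv track=rewrite | github.com/tanushree-sharma/voice-test | pipecat-test/langsmith_processor.py | _split_conversation_messages
-- ===== SOURCE A (Python) =====
-- def _split_conversation_messages(messages: list) -> tuple:
--     """
--     Split conversation messages into system, first user, and remaining messages.
--     Returns: (system_msg, first_user_msg, remaining_msgs)
--     """
--     system_msg = None
--     first_user_msg = None
--     remaining_msgs = []
--     first_user_found = False
--
--     for msg in messages:
--         role = msg.get("role", "")
--         if role == "system" and system_msg is None:
--             system_msg = msg
--         elif role == "user" and not first_user_found:
--             first_user_msg = msg
--             first_user_found = True
--         elif first_user_found: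
--             remaining_msgs.append(msg)
--
--     return (system_msg, first_user_msg, remaining_msgs)
-- ===== SOURCE B (Python) =====
-- def _split_conversation_messages(messages: list) -> tuple:
--     """
--     Split conversation messages into system, first user, and remaining messages.
--     Returns: (system_msg, first_user_msg, remaining_msgs)
--     """
--     sys_idx = next((i for i, m in enumerate(messages) if m.get("role", "") == "system"), None)
--     user_idx = next((i for i, m in enumerate(messages) if m.get("role", "") == "user"), None)
--     system_msg = messages[sys_idx] if sys_idx is not None else None
--     if user_idx is None:
--         return (system_msg, None, [])
--     remaining = [m for i, m in enumerate(messages) if i > user_idx and i != sys_idx]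
--     return (system_msg, messages[user_idx], remaining)
-- ===== Notes on version B (the rewrite author's own statement) =====
-- stated objective: simpler
-- what changed: Replaces A's single loop carrying four pieces of state (system slot, user slot, remainder accumulator, found flag) by two index scans for the first system and first user message plus one comprehension selecting the messages after the first user other than the captured system message.
import Mathlib
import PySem

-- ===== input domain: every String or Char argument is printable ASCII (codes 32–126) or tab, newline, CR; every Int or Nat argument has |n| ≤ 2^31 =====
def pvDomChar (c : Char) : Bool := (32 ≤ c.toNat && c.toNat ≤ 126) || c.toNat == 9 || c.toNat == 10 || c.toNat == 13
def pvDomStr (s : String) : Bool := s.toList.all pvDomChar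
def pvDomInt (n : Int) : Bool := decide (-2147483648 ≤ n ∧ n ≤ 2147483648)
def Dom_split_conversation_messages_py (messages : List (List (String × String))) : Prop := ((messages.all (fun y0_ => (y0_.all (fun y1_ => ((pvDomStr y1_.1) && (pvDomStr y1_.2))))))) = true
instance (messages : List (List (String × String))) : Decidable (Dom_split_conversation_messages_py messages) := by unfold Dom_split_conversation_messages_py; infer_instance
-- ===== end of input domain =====

-- B replaces A's four-state accumulating loop by two index scans (first system, first user)
-- plus one comprehension over enumerate; objective: simpler, same cost.

-- ===== PORT A =====
-- shared helper: msg.get("role", "") (dict lookup with default)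
def pvRole (msg : List (String × String)) : String := PySem.Dict.getD (PySem.Dict.mk msg) "role" ""

def pvStepA (st : Option (List (String × String)) × Option (List (String × String)) × List (List (String × String)) × Bool)
    (msg : List (String × String)) :
    Option (List (String × String)) × Option (List (String × String)) × List (List (String × String)) × Bool :=
  match st with
  | (system_msg, first_user_msg, remaining_msgs, first_user_found) =>
    let role := pvRole msg
    if role == "system" && system_msg.isNone then (some msg, first_user_msg, remaining_msgs, first_user_found)
    else if role == "user" && !first_user_found then (system_msg, some msg, remaining_msgs, true)
    else if first_user_found then (system_msg, first_user_msg, remaining_msgs ++ [msg], first_user_found)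
    else st

def split_conversation_messages_py (messages : List (List (String × String))) : (Option (List (String × String))) × (Option (List (String × String))) × (List (List (String × String))) :=
  let r := messages.foldl pvStepA (none, none, [], false)
  (r.1, r.2.1, r.2.2.1)

-- ===== PORT B =====
def split_conversation_messages_py_alt (messages : List (List (String × String))) : (Option (List (String × String))) × (Option (List (String × String))) × (List (List (String × String))) :=
  -- sys_idx = next((i for i, m in enumerate(messages) if m.get("role","") == "system"), None)
  let sysIdx? := ((PySem.List.enumerate messages).find? (fun p => pvRole p.2 == "system")).map (·.1)
  -- user_idx = next((i for i, m in enumerate(messages) if m.get("role","") == "user"), None)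
  let userIdx? := ((PySem.List.enumerate messages).find? (fun p => pvRole p.2 == "user")).map (·.1)
  -- system_msg = messages[sys_idx] if sys_idx is not None else None
  let systemMsg := sysIdx?.bind (fun i => PySem.List.pyGet? messages i)
  match userIdx? with
  | none => (systemMsg, none, [])
  | some j =>
    -- remaining = [m for i, m in enumerate(messages) if i > user_idx and i != sys_idx]
    let remaining := ((PySem.List.enumerate messages).filter
        (fun p => decide (j < p.1) && !(sysIdx? == some p.1))).map (·.2)
    (systemMsg, PySem.List.pyGet? messages j, remaining)

-- ===== PRECONDITION & SPEC =====
-- A is total: no precondition.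
def Spec_split_conversation_messages_py (messages : List (List (String × String))) (out : (Option (List (String × String))) × (Option (List (String × String))) × (List (List (String × String)))) : Prop := out = split_conversation_messages_py_alt messages
instance (messages : List (List (String × String))) (out : (Option (List (String × String))) × (Option (List (String × String))) × (List (List (String × String)))) : Decidable (Spec_split_conversation_messages_py messages out) := by unfold Spec_split_conversation_messages_py; infer_instance

-- ===== CLAIM (what is proved, stated in full; the proofs are below) =====
def Claim_equal_split_conversation_messages_py : Prop := ∀ (messages : List (List (String × String))), Dom_split_conversation_messages_py messages → Spec_split_conversation_messages_py messages (split_conversation_messages_py messages)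

-- ===== LEMMAS AND PROOFS =====

lemma L2a (ms : List (List (String × String))) (s u : List (String × String)) (rem : List (List (String × String))) :
    ms.foldl pvStepA (some s, some u, rem, true) = (some s, some u, rem ++ ms, true) := by
  induction ms generalizing rem with
  | nil => simp
  | cons m ms ih => simp [pvStepA, ih]

lemma L2b (ms : List (List (String × String))) (u : List (String × String)) (rem : List (List (String × String))) :
    ms.foldl pvStepA (none, some u, rem, true) =
      ((ms.findIdx? (fun m => pvRole m == "system")).bind (fun i => ms[i]?), some u,
       rem ++ (match ms.findIdx? (fun m => pvRole m == "system") with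
               | some k => ms.eraseIdx k
               | none => ms), true) := by
  induction ms generalizing rem with
  | nil => simp
  | cons m ms ih =>
    by_cases h : pvRole m == "system"
    · simp [pvStepA, h, L2a, List.findIdx?_cons]
    · simp only [List.foldl_cons, pvStepA, h, Bool.false_and, if_true, Bool.false_eq_true,
        Bool.not_true, Bool.and_false, if_false, List.findIdx?_cons]
      rw [ih]
      cases ms.findIdx? (fun m => pvRole m == "system") <;> simp

lemma L1a (ms : List (List (String × String))) (s : List (String × String)) :
    ms.foldl pvStepA (some s, none, [], false) =
      (match ms.findIdx? (fun m => pvRole m == "user") with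
       | none => (some s, none, ([] : List (List (String × String))), false)
       | some j => (some s, ms[j]?, ms.drop (j+1), true)) := by
  induction ms with
  | nil => simp
  | cons m ms ih =>
    by_cases h : pvRole m == "user"
    · have hs : ¬ (pvRole m == "system") = true := by
        intro hc; simp_all
      simp [pvStepA, h, hs, L2a, List.findIdx?_cons]
    · simp only [List.foldl_cons, pvStepA, h, Option.isNone_some, Bool.and_false,
        Bool.false_eq_true, if_false, Bool.false_and, List.findIdx?_cons]
      rw [ih]
      cases ms.findIdx? (fun m => pvRole m == "user") <;> simp

lemma L0 (ms : List (List (String × String))) :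
    ms.foldl pvStepA (none, none, [], false) =
      (match ms.findIdx? (fun m => pvRole m == "user") with
       | none => ((ms.findIdx? (fun m => pvRole m == "system")).bind (fun i => ms[i]?), none,
                  ([] : List (List (String × String))), false)
       | some j => ((ms.findIdx? (fun m => pvRole m == "system")).bind (fun i => ms[i]?), ms[j]?,
           (match ms.findIdx? (fun m => pvRole m == "system") with
            | some i => if j < i then (ms.drop (j+1)).eraseIdx (i - j - 1) else ms.drop (j+1)
            | none => ms.drop (j+1)), true)) := by
  induction ms with
  | nil => simp
  | cons m ms ih =>
    by_cases hs : pvRole m == "system"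
    · have hu : ¬ (pvRole m == "user") = true := by intro hc; simp_all
      simp only [List.foldl_cons, pvStepA, hs, Option.isNone_none, Bool.and_true, if_true,
        List.findIdx?_cons, hu, Bool.false_eq_true, if_false]
      rw [L1a]
      cases ms.findIdx? (fun m => pvRole m == "user") <;> simp
    · by_cases hu : pvRole m == "user"
      · simp only [List.foldl_cons, pvStepA, hs, hu, Bool.false_and, Bool.false_eq_true, if_false,
          Bool.not_false, Bool.and_true, if_true, List.findIdx?_cons]
        rw [L2b]
        cases ms.findIdx? (fun m => pvRole m == "system") <;> simp
      · simp only [List.foldl_cons, pvStepA, hs, hu, Bool.false_and, Bool.false_eq_true, if_false,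
          List.findIdx?_cons]
        rw [ih]
        cases hju : ms.findIdx? (fun m => pvRole m == "user") with
        | none => cases ms.findIdx? (fun m => pvRole m == "system") <;> simp
        | some j =>
          cases hsi : ms.findIdx? (fun m => pvRole m == "system") with
          | none => simp
          | some i =>
            simp only [Option.map_some, Option.bind_some, List.getElem?_cons_succ]
            by_cases hlt : j < i
            · simp [hlt, Nat.succ_lt_succ hlt]
            · simp [hlt]

-- find? over enumerate vs findIdx?
lemma find?_enumerate_eq {α : Type} (q : α → Bool) (xs : List α) (s : Int) :
    ((PySem.List.enumerate xs s).find? (fun p => q p.2)).map (·.1) =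
      (xs.findIdx? q).map (fun k => s + (k : Int)) := by
  induction xs generalizing s with
  | nil => simp [PySem.List.enumerate_nil]
  | cons x xs ih =>
    by_cases h : q x
    · simp [PySem.List.enumerate_cons, h, List.findIdx?_cons]
    · simp only [PySem.List.enumerate_cons, List.find?, h, List.findIdx?_cons, Bool.false_eq_true,
        if_false]
      rw [ih]
      cases xs.findIdx? q <;> simp; omega

-- filtering enumerate by "index ≠ c" removes exactly the element at position c (if in range)
lemma filter_ne_enumerate {α : Type} (xs : List α) (s c : Int) :
    ((PySem.List.enumerate xs s).filter (fun p => !(p.1 == c))).map (·.2) =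
      if s ≤ c ∧ c < s + xs.length then xs.eraseIdx (c - s).toNat else xs := by
  induction xs generalizing s with
  | nil => simp [PySem.List.enumerate_nil]
  | cons x xs ih =>
    by_cases h : s = c
    · subst h
      have hall : ((PySem.List.enumerate xs (s+1)).filter (fun p => !(p.1 == s))).map (·.2) = xs := by
        have : (PySem.List.enumerate xs (s+1)).filter (fun p => !(p.1 == s)) =
            PySem.List.enumerate xs (s+1) := by
          apply List.filter_eq_self.mpr
          intro p hp
          rcases (PySem.List.mem_enumerate_iff _ _ _).mp hp with ⟨k, hk, rfl⟩
          simp; omega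
        rw [this, PySem.List.map_snd_enumerate]
      simp only [PySem.List.enumerate_cons, List.filter_cons, beq_self_eq_true, Bool.not_true,
        Bool.false_eq_true, if_false, hall]
      have hc : s ≤ s ∧ s < s + ((x :: xs).length : Int) := by refine ⟨by omega, ?_⟩; simp only [List.length_cons]; push_cast; omega
      rw [if_pos hc]
      simp
    · have hne : (!((s : Int) == c)) = true := by simp; omega
      simp only [PySem.List.enumerate_cons, List.filter_cons, hne, if_true, List.map_cons]
      rw [ih]
      by_cases hr : s + 1 ≤ c ∧ c < s + 1 + (xs.length : Int)
      · have hr' : s ≤ c ∧ c < s + ((x :: xs).length : Int) := by simp at hr ⊢; omega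
        rw [if_pos hr, if_pos hr']
        have : (c - s).toNat = (c - (s+1)).toNat + 1 := by omega
        rw [this, List.eraseIdx_cons_succ]
      · have hr' : ¬ (s ≤ c ∧ c < s + ((x :: xs).length : Int)) := by
          simp at hr ⊢; intro h1; omega
        rw [if_neg hr, if_neg hr']

-- filtering enumerate by "index > j" keeps exactly the suffix after position j
lemma filter_gt_enumerate {α : Type} (xs : List α) (s : Int) (j : Int)
    (q : Int → Bool) :
    ((PySem.List.enumerate xs s).filter (fun p => decide (j < p.1) && q p.1)).map (·.2) =
      (if _h : s ≤ j + 1 then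
        ((PySem.List.enumerate (xs.drop (j + 1 - s).toNat) (j+1)).filter (fun p => q p.1)).map (·.2)
       else ((PySem.List.enumerate xs s).filter (fun p => q p.1)).map (·.2)) := by
  induction xs generalizing s with
  | nil => simp [PySem.List.enumerate_nil]
  | cons x xs ih =>
    by_cases hs : s ≤ j
    · -- head index s ≤ j: filtered out on the left; on the right it is dropped
      have hd : (decide (j < s) && q s) = false := by simp; intro h; omega
      have hds : s ≤ j + 1 := by omega
      simp only [PySem.List.enumerate_cons, List.filter_cons, hd, Bool.false_eq_true, if_false]
      rw [ih, dif_pos hds]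
      have h1 : s + 1 ≤ j + 1 := by omega
      rw [dif_pos h1]
      have : (j + 1 - s).toNat = (j + 1 - (s+1)).toNat + 1 := by omega
      rw [this, List.drop_succ_cons]
    · -- head index s > j: the extra conjunct is true from here on; drop count is 0
      have hd : ∀ i : Int, s ≤ i → (decide (j < i) && q i) = q i := by
        intro i hi; have : j < i := by omega
        simp [this]
      have hcong : (PySem.List.enumerate (x :: xs) s).filter (fun p => decide (j < p.1) && q p.1) =
          (PySem.List.enumerate (x :: xs) s).filter (fun p => q p.1) := by
        apply List.filter_congr
        intro p hp
        rcases (PySem.List.mem_enumerate_iff _ _ _).mp hp with ⟨k, hk, rfl⟩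
        exact hd _ (by omega)
      rw [hcong]
      by_cases hds : s ≤ j + 1
      · -- then s = j + 1 exactly
        have hsj : s = j + 1 := by omega
        rw [dif_pos hds]
        have : (j + 1 - s).toNat = 0 := by omega
        rw [this, List.drop_zero, hsj]
      · rw [dif_neg hds]

lemma pv_findIdx?_lt {α : Type} {q : α → Bool} {xs : List α} {j : Nat}
    (h : xs.findIdx? q = some j) : j < xs.length := by
  have := List.findIdx?_eq_some_iff_findIdx_eq.mp h
  omega

lemma pv_A_eq_B (ms : List (List (String × String))) :
    split_conversation_messages_py ms = split_conversation_messages_py_alt ms := by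
  unfold split_conversation_messages_py split_conversation_messages_py_alt
  dsimp only
  rw [L0, find?_enumerate_eq (fun m => pvRole m == "system"),
      find?_enumerate_eq (fun m => pvRole m == "user")]
  simp only [zero_add]
  cases hju : ms.findIdx? (fun m => pvRole m == "user") with
  | none =>
    cases hsi : ms.findIdx? (fun m => pvRole m == "system") with
    | none => simp [Option.map_none, Option.pure_def, Option.bind_none]
    | some i =>
      have hi : i < ms.length := pv_findIdx?_lt hsi
      simp [Option.map_some, Option.map_none, Option.pure_def, Option.bind_some, Option.bind_none, PySem.List.pyGet?_natCast]
  | some j =>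
    have hj : j < ms.length := pv_findIdx?_lt hju
    cases hsi : ms.findIdx? (fun m => pvRole m == "system") with
    | none =>
      simp [Option.map_some, Option.map_none, Option.pure_def, Option.bind_some, Option.bind_none, PySem.List.pyGet?_natCast]
      have hfe := filter_gt_enumerate ms 0 (j : Int)
          (fun i => !((none : Option Int) == some i))
      simp only [show ∀ k : Int, (!((none : Option Int) == some k)) = true from fun k => rfl,
        Bool.and_true] at hfe ⊢
      rw [hfe, dif_pos (by omega : (0:Int) ≤ (j:Int) + 1)]
      have h0 : ((j:Int) + 1 - 0).toNat = j + 1 := by omega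
      rw [h0]
      simp [List.filter_eq_self.mpr, PySem.List.map_snd_enumerate]
    | some i =>
      have hi : i < ms.length := pv_findIdx?_lt hsi
      simp [Option.map_some, Option.pure_def, Option.bind_some, PySem.List.pyGet?_natCast]
      have hfe := filter_gt_enumerate ms 0 (j : Int)
          (fun k => !((some (i:Int) : Option Int) == some k))
      simp only [show ∀ k : Int, (!((some (i:Int) : Option Int) == some k)) = (!(k == (i:Int)))
        from by intro k; simp; omega] at hfe
      simp only [show ∀ k : Int, ((i:Int) == k) = (k == (i:Int)) from by intro k; simp [eq_comm]]
      rw [hfe, dif_pos (by omega : (0:Int) ≤ (j:Int) + 1)]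
      have h0 : ((j:Int) + 1 - 0).toNat = j + 1 := by omega
      rw [h0, filter_ne_enumerate]
      by_cases hlt : j < i
      · have hc : (j:Int) + 1 ≤ (i:Int) ∧ (i:Int) < (j:Int) + 1 + ((ms.drop (j+1)).length : Int) := by
          refine ⟨by omega, ?_⟩
          simp only [List.length_drop]
          omega
        rw [if_pos hc]
        have he : ((i:Int) - ((j:Int)+1)).toNat = i - j - 1 := by omega
        rw [he]
        simp [hlt]
      · have hc : ¬ ((j:Int) + 1 ≤ (i:Int) ∧ (i:Int) < (j:Int) + 1 + ((ms.drop (j+1)).length : Int)) := by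
          intro h; omega
        rw [if_neg hc]
        simp [hlt]

-- ===== VERDICT (by name: the statement is the Claim_ definition above) =====
theorem split_conversation_messages_py_spec : Claim_equal_split_conversation_messages_py := by
  intro ms _
  unfold Spec_split_conversation_messages_py
  exact pv_A_eq_B ms
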